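-- pv_equiv track=rewrite | github.com/lsk74669/Coding_Test | 프로그래머스/0/120871. 저주의 숫자 3/저주의 숫자 3.py | solution
-- ===== SOURCE A (Python) =====
-- def solution(n):
--     answer = 0
--     cnt = 0
--
--     while n > 0:
--         cnt += 1
--         if cnt % 3 != 0 and '3' not in str(cnt):
--             n -= 1
--             answer = cnt
--
--     return answer
-- ===== SOURCE B (Python) =====
-- def solution(n):
--     # Valid numbers (no digit 3, not a multiple of 3) come exactly six per block of nine
--     # consecutive no-digit-3 numbers sharing a decimal prefix p; block prefixes are produced
--     # by remapping the base-9 digits of the block index past the digit three.  No scan.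
--     q, r = divmod(n - 1, 6)
--     p = 0
--     mult = 1
--     while q > 0:
--         q, d = divmod(q, 9)
--         p += (d if d < 3 else d + 1) * mult
--         mult *= 10
--     allowed = [d for d in (0, 1, 2, 4, 5, 6, 7, 8, 9) if (p + d) % 3 != 0]
--     return p * 10 + allowed[r]
-- ===== Notes on version B (the rewrite author's own statement) =====
-- stated objective: faster
-- what changed: A scans every integer upward testing each candidate with str(); B computes the answer directly with no scan: valid numbers come exactly six per block of nine consecutive no-digit-3 numbers, block prefixes are obtained by remapping the base-9 digits of the block index past the digit three, so B takes divmod(n-1,6), remaps the quotient, and picks the r-th allowed last digit of that block.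
-- outside the precondition, e.g. on solution(0): A returns 0, B returns 8; on solution(-5): A returns 0, B returns 1
import Mathlib
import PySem

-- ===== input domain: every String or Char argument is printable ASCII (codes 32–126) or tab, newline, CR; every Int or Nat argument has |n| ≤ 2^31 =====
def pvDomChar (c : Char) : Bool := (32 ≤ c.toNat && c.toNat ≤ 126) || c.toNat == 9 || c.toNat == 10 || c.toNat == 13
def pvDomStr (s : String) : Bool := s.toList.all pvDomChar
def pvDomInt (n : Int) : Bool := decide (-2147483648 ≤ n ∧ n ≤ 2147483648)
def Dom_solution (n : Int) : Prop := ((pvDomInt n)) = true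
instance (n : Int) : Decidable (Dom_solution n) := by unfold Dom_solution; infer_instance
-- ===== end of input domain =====

-- B replaces A's linear upward scan by direct arithmetic: valid numbers come exactly six per
-- block of nine consecutive no-digit-3 numbers, and block prefixes come from remapping the
-- block index's base-9 digits past the digit three; objective: faster (measured).

-- ---- helpers for the TERMINATION argument of port A (cited by name in decreasing_by) ----

-- "cnt % 3 != 0 and '3' not in str(cnt)" as a Bool (A's loop condition on a candidate)
def pvValid (c : Int) : Bool :=
  decide (PySem.Int.mod c 3 ≠ 0) && !(PySem.Str.isIn "3" (PySem.Int.toStr c))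

-- big-endian decimal digits of a Nat (proof-side model of Nat.toDigits 10)
def pvDigits (m : Nat) : List Char :=
  if m < 10 then [Nat.digitChar m]
  else pvDigits (m / 10) ++ [Nat.digitChar (m % 10)]
  decreasing_by exact Nat.div_lt_self (by omega) (by omega)

lemma pvTDC_append (f : Nat) : ∀ (n : Nat) (l : List Char),
    Nat.toDigitsCore 10 f n l = Nat.toDigitsCore 10 f n [] ++ l := by
  induction f with
  | zero => intro n l; simp [Nat.toDigitsCore]
  | succ f ih =>
    intro n l
    simp only [Nat.toDigitsCore]
    by_cases h : n / 10 = 0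
    · simp [h]
    · simp only [h, if_false]
      rw [ih (n / 10) ((n % 10).digitChar :: l), ih (n / 10) [(n % 10).digitChar]]
      simp

lemma pvTDC_eq_digits (f : Nat) : ∀ (n : Nat), 0 < f → n < 10 ^ f →
    Nat.toDigitsCore 10 f n [] = pvDigits n := by
  induction f with
  | zero => omega
  | succ f ih =>
    intro n _ hn
    simp only [Nat.toDigitsCore]
    by_cases h : n / 10 = 0
    · have h10 : n < 10 := by omega
      rw [pvDigits]
      simp [h, h10, Nat.mod_eq_of_lt h10]
    · have h10 : ¬ n < 10 := by omega
      have hf : 0 < f := by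
        rcases Nat.eq_zero_or_pos f with h0 | h0
        · subst h0; rw [pow_one] at hn; omega
        · exact h0
      simp only [h, if_false]
      rw [pvTDC_append, ih (n / 10) hf
        (Nat.div_lt_of_lt_mul (by rw [← pow_succ']; exact hn))]
      conv_rhs => rw [pvDigits, if_neg h10]

lemma pvToDigits_eq (n : Nat) : Nat.toDigits 10 n = pvDigits n := by
  have h1 : n < 10 ^ (n + 1) := by
    have h2 : n < 10 ^ n := Nat.lt_pow_self (by omega)
    have h3 : 10 ^ n ≤ 10 ^ (n + 1) := Nat.pow_le_pow_right (by omega) (by omega)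
    omega
  exact pvTDC_eq_digits (n + 1) n (by omega) h1

lemma pvDigits_pow (k : Nat) : pvDigits (10 ^ k) = '1' :: List.replicate k '0' := by
  induction k with
  | zero =>
    rw [pow_zero, pvDigits, if_pos (by omega : (1:Nat) < 10)]
    decide
  | succ k ih =>
    have h : ¬ 10 ^ (k + 1) < 10 := by
      have : 10 ^ 1 ≤ 10 ^ (k + 1) := Nat.pow_le_pow_right (by omega) (by omega)
      simpa using this
    have hd : 10 ^ (k + 1) / 10 = 10 ^ k := by
      rw [pow_succ]; exact Nat.mul_div_cancel _ (by omega)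
    have hm : 10 ^ (k + 1) % 10 = 0 := by
      rw [pow_succ]; exact Nat.mul_mod_left _ _
    rw [pvDigits, if_neg h, hd, hm, ih]
    simp [List.replicate_succ' (n := k), show Nat.digitChar 0 = '0' from rfl]

-- the decimal string of a nonnegative Int, via pvDigits
lemma pvToChars_nonneg (c : Int) (h : 0 ≤ c) :
    PySem.Int.toChars c = pvDigits c.toNat := by
  simp [PySem.Int.toChars, not_lt.mpr h, pvToDigits_eq]

lemma pvValid_pow (k : Nat) : pvValid ((10 : Int) ^ k) = true := by
  have hpos : (0 : Int) ≤ (10 : Int) ^ k := by positivity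
  have hmod : PySem.Int.mod ((10 : Int) ^ k) 3 ≠ 0 := by
    rw [Ne, PySem.Int.mod_eq_zero_iff_dvd]
    intro hdvd
    have h3 : Prime (3 : Int) := Int.prime_three
    have := h3.dvd_of_dvd_pow hdvd
    norm_num at this
  have hchars : PySem.Int.toChars ((10 : Int) ^ k) = '1' :: List.replicate k '0' := by
    rw [pvToChars_nonneg _ hpos]
    have : ((10 : Int) ^ k).toNat = 10 ^ k := by
      rw [show ((10 : Int) ^ k) = ((10 ^ k : Nat) : Int) by push_cast; ring]
      exact Int.toNat_natCast _
    rw [this, pvDigits_pow]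
  have hisin : PySem.Str.isIn "3" (PySem.Int.toStr ((10 : Int) ^ k)) = false := by
    rw [Bool.eq_false_iff, Ne, PySem.Str.isIn_iff_infix, PySem.Int.toList_toStr, hchars]
    intro hinf
    have h3 : '3' ∈ '1' :: List.replicate k '0' :=
      hinf.subset (by simp : '3' ∈ ['3'])
    simp [List.mem_replicate] at h3
  simp only [pvValid, hisin, Bool.not_false, Bool.and_true, decide_eq_true_eq]
  exact hmod

lemma pvValid_exists (c : Int) : ∃ d : Nat, pvValid (c + (d : Int)) = true := by
  set k : Nat := c.natAbs + 1 with hk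
  have hlt : c < (10 : Int) ^ k := by
    have h1 : (c.natAbs : Int) < ((10 : Nat) ^ k : Nat) := by
      exact_mod_cast Nat.lt_pow_self (by omega) (n := c.natAbs) |>.trans_le
        (Nat.pow_le_pow_right (by omega) (by omega))
    have h2 : c ≤ (c.natAbs : Int) := Int.le_natAbs
    calc c ≤ (c.natAbs : Int) := h2
      _ < ((10 : Nat) ^ k : Nat) := h1
      _ = (10 : Int) ^ k := by push_cast; ring
  refine ⟨((10 : Int) ^ k - c).toNat, ?_⟩
  have : c + (((10 : Int) ^ k - c).toNat : Int) = (10 : Int) ^ k := by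
    rw [Int.toNat_of_nonneg (by omega)]; ring
  rw [this]; exact pvValid_pow k

-- distance from c to the next valid candidate ≥ c (the termination measure of A's loop)
def pvGap (c : Int) : Nat := Nat.find (pvValid_exists c)

lemma pvGap_lt (c : Int) (h : pvValid c = false) : pvGap (c + 1) < pvGap c := by
  have hspec := Nat.find_spec (pvValid_exists c)
  have hne : pvGap c ≠ 0 := by
    intro h0
    rw [show Nat.find (pvValid_exists c) = pvGap c from rfl, h0] at hspec
    simp at hspec
    rw [hspec] at h; cases h
  have hval : pvValid ((c + 1) + ((pvGap c - 1 : Nat) : Int)) = true := by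
    have : (c + 1) + ((pvGap c - 1 : Nat) : Int) = c + ((pvGap c : Nat) : Int) := by
      push_cast [Nat.cast_sub (by omega : 1 ≤ pvGap c)]; ring
    rw [this]; exact hspec
  have hle : pvGap (c + 1) ≤ pvGap c - 1 := Nat.find_le hval
  omega

-- ===== PORT A =====
def solutionGo (n cnt answer : Int) : Int :=
  if 0 < n then
    if PySem.Int.mod (cnt + 1) 3 ≠ 0 ∧ PySem.Str.isIn "3" (PySem.Int.toStr (cnt + 1)) = false then
      solutionGo (n - 1) (cnt + 1) (cnt + 1)
    else
      solutionGo n (cnt + 1) answer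
  else answer
  termination_by (n.toNat, pvGap (cnt + 1))
  decreasing_by
  · exact Prod.Lex.left _ _ (by omega)
  · have hfalse : pvValid (cnt + 1) = false := by
      rename_i hn hcond
      simp only [pvValid, Bool.and_eq_false_iff, decide_eq_false_iff_not]
      by_cases h1 : PySem.Int.mod (cnt + 1) 3 = 0
      · left; simpa using h1
      · right
        by_contra h2
        exact hcond ⟨h1, by simpa using h2⟩
    have := pvGap_lt (cnt + 1) hfalse
    exact Prod.Lex.right _ (by omega)

def solution (n : Int) : Int := solutionGo n 0 0

-- ===== PORT B =====
-- "while q > 0: q, d = divmod(q, 9); p += (d if d < 3 else d + 1) * mult; mult *= 10"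
def solutionAltGo (q p mult : Int) : Int :=
  if 0 < q then
    solutionAltGo (PySem.Int.floordiv q 9)
      (p + (if PySem.Int.mod q 9 < 3 then PySem.Int.mod q 9 else PySem.Int.mod q 9 + 1) * mult)
      (mult * 10)
  else p
  termination_by q.toNat
  decreasing_by
    rename_i hq
    have h2 : PySem.Int.floordiv q 9 < q :=
      (PySem.Int.floordiv_lt_iff_lt_mul (by omega)).mpr (by omega)
    have h3 : (0 : Int) ≤ PySem.Int.floordiv q 9 :=
      (PySem.Int.le_floordiv_iff_mul_le (by omega)).mpr (by omega)
    omega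

def solution_alt (n : Int) : Int :=
  let q := PySem.Int.floordiv (n - 1) 6
  let r := PySem.Int.mod (n - 1) 6
  let p := solutionAltGo q 0 1
  let allowed := ([0, 1, 2, 4, 5, 6, 7, 8, 9] : List Int).filter
    (fun d => decide (PySem.Int.mod (p + d) 3 ≠ 0))
  -- index always in range: 0 ≤ r < 6 = allowed.length, so Python's allowed[r] never raises
  p * 10 + PySem.List.pyGetD allowed r 0

-- ===== PRECONDITION & SPEC =====
-- Pre_ excludes n ≤ 0, outside the problem's natural domain (n ≥ 1), where A's never-entered
-- loop returns its leftover 0 while B's block arithmetic returns an accidental digit.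
def Pre_solution (n : Int) : Prop := 1 ≤ n
instance (n : Int) : Decidable (Pre_solution n) := by unfold Pre_solution; infer_instance
def pvWitness_solution : Int := 1

def Spec_solution (n : Int) (out : Int) : Prop := out = solution_alt n
instance (n : Int) (out : Int) : Decidable (Spec_solution n out) := by unfold Spec_solution; infer_instance

-- ===== CLAIM (what is proved, stated in full; the proofs are below) =====
def Claim_equal_solution : Prop := ∀ (n : Int), Dom_solution n → Pre_solution n → Spec_solution n (solution n)

-- ===== LEMMAS AND PROOFS =====

-- ---- an arithmetic "no digit 3" test, linked to the string test of pvValid ----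
def okDigits (c : Int) : Bool :=
  if 0 < c then
    if PySem.Int.mod c 10 = 3 then false else okDigits (PySem.Int.floordiv c 10)
  else true
  termination_by c.toNat
  decreasing_by
    rename_i hc _
    have h2 : PySem.Int.floordiv c 10 < c :=
      (PySem.Int.floordiv_lt_iff_lt_mul (by omega)).mpr (by omega)
    have h3 : (0 : Int) ≤ PySem.Int.floordiv c 10 :=
      (PySem.Int.le_floordiv_iff_mul_le (by omega)).mpr (by omega)
    omega

def ok (c : Int) : Bool :=
  if PySem.Int.mod c 3 = 0 then false else okDigits c

lemma pvDigitChar_three (d : Nat) (hd : d < 10) : Nat.digitChar d = '3' ↔ d = 3 := by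
  interval_cases d <;> decide

lemma pvDigits_three (m : Nat) : ('3' ∈ pvDigits m) ↔ (okDigits (m : Int) = false) := by
  induction m using Nat.strong_induction_on with
  | _ m ih =>
    by_cases hm : m = 0
    · subst hm
      rw [pvDigits, okDigits]
      norm_num
      decide
    · have hpos : (0 : Int) < m := by exact_mod_cast Nat.pos_of_ne_zero hm
      have hmod : PySem.Int.mod (m : Int) 10 = ((m % 10 : Nat) : Int) := PySem.Int.mod_natCast m 10
      have hdiv : PySem.Int.floordiv (m : Int) 10 = ((m / 10 : Nat) : Int) := PySem.Int.floordiv_natCast m 10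
      by_cases h3 : m % 10 = 3
      · have hok : okDigits (m : Int) = false := by
          rw [okDigits, if_pos hpos, hmod, if_pos (by exact_mod_cast h3)]
        have hmem : '3' ∈ pvDigits m := by
          rw [pvDigits]
          by_cases h10 : m < 10
          · have : m = 3 := by omega
            subst this; decide
          · rw [if_neg h10]
            have : Nat.digitChar (m % 10) = '3' := by rw [h3]; decide
            simp [this]
        exact iff_of_true hmem (by rw [hok])
      · have hok : okDigits (m : Int) = okDigits ((m / 10 : Nat) : Int) := by
          rw [okDigits, if_pos hpos, hmod, if_neg (by exact_mod_cast h3), hdiv]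
        have hcharne : Nat.digitChar (m % 10) ≠ '3' := by
          intro hh
          exact h3 ((pvDigitChar_three (m % 10) (Nat.mod_lt _ (by omega))).mp hh)
        by_cases h10 : m < 10
        · have hmm : m % 10 = m := Nat.mod_eq_of_lt h10
          have hd0 : m / 10 = 0 := Nat.div_eq_of_lt h10
          have hlhs : ¬ '3' ∈ pvDigits m := by
            rw [pvDigits, if_pos h10]
            intro hh
            rcases List.mem_singleton.mp hh with hh
            exact hcharne (by rw [hmm]; exact hh.symm)
          have hrhs : okDigits ((m / 10 : Nat) : Int) = true := by
            rw [hd0]; rw [okDigits]; norm_num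
          refine iff_of_false hlhs ?_
          rw [hok, hrhs]; simp
        · have hdivlt : m / 10 < m := Nat.div_lt_self (by omega) (by omega)
          have ihm := ih (m / 10) hdivlt
          rw [pvDigits, if_neg h10, hok]
          simp only [List.mem_append, List.mem_singleton]
          constructor
          · intro hh
            rcases hh with hh | hh
            · exact ihm.mp hh
            · exact absurd hh.symm hcharne
          · intro hh
            exact Or.inl (ihm.mpr hh)

lemma pv_ok_eq_valid (c : Int) (hc : 0 < c) : ok c = pvValid c := by
  have hchars : PySem.Int.toChars c = pvDigits c.toNat := pvToChars_nonneg c (by omega)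
  have hcast : ((c.toNat : Nat) : Int) = c := Int.toNat_of_nonneg (by omega)
  have hiff : PySem.Str.isIn "3" (PySem.Int.toStr c) = true ↔ '3' ∈ pvDigits c.toNat := by
    rw [PySem.Str.isIn_iff_infix, PySem.Int.toList_toStr, hchars]
    constructor
    · intro hinf; exact hinf.subset (by simp : '3' ∈ ['3'])
    · intro hmem; exact (List.singleton_infix_iff '3' _).mpr hmem
  have hok3 : okDigits c = false ↔ '3' ∈ pvDigits c.toNat := by
    have h := pvDigits_three c.toNat
    rw [hcast] at h
    exact h.symm
  rw [ok, pvValid]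
  by_cases h1 : PySem.Int.mod c 3 = 0
  · rw [if_pos h1, decide_eq_false (not_not_intro h1), Bool.false_and]
  · rw [if_neg h1, decide_eq_true h1, Bool.true_and]
    by_cases h2 : '3' ∈ pvDigits c.toNat
    · rw [hok3.mpr h2, hiff.mpr h2]
      rfl
    · have ha : okDigits c = true := by
        rcases Bool.eq_false_or_eq_true (okDigits c) with ht | hf
        · exact ht
        · exact absurd (hok3.mp hf) h2
      have hb : PySem.Str.isIn "3" (PySem.Int.toStr c) = false := by
        rcases Bool.eq_false_or_eq_true (PySem.Str.isIn "3" (PySem.Int.toStr c)) with ht | hf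
        · exact absurd (hiff.mp ht) h2
        · exact hf
      rw [ha, hb]
      rfl

lemma pv_ok_false_valid (c : Int) (h : ok c = false) : pvValid c = false := by
  by_cases hc : 0 < c
  · rw [← pv_ok_eq_valid c hc]; exact h
  · by_cases h1 : PySem.Int.mod c 3 = 0
    · rw [pvValid, decide_eq_false (not_not_intro h1), Bool.false_and]
    · exfalso
      have hd : okDigits c = true := by rw [okDigits, if_neg hc]
      rw [ok, if_neg h1, hd] at h
      cases h

-- ---- "advance to the next valid candidate" (proof-side model of A's inner stepping) ----
def nextGo (c : Int) : Int :=
  if ok c = false then nextGo (c + 1) else c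
  termination_by pvGap c
  decreasing_by exact pvGap_lt c (pv_ok_false_valid c (by assumption))

lemma nextGo_of_valid (c : Int) (hc : 0 < c) (h : pvValid c = true) : nextGo c = c := by
  rw [nextGo, pv_ok_eq_valid c hc, h]; simp

lemma nextGo_of_invalid (c : Int) (h : ok c = false) : nextGo c = nextGo (c + 1) := by
  rw [nextGo, h]; simp

lemma nextGo_ge (c : Int) : c ≤ nextGo c := by
  induction c using nextGo.induct with
  | case1 c h ih => rw [nextGo_of_invalid c h]; omega
  | case2 c h =>
    rw [nextGo]
    simp only [Bool.not_eq_false] at h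
    simp [h]

lemma solutionGo_step : ∀ (g : Nat) (cnt : Int), pvGap (cnt + 1) ≤ g → 0 ≤ cnt →
    ∀ (n a : Int), 0 < n →
    solutionGo n cnt a = solutionGo (n - 1) (nextGo (cnt + 1)) (nextGo (cnt + 1)) := by
  intro g
  induction g with
  | zero =>
    intro cnt hg hcnt n a hn
    have hval : pvValid (cnt + 1) = true := by
      have hspec := Nat.find_spec (pvValid_exists (cnt + 1))
      have h0 : pvGap (cnt + 1) = 0 := by omega
      rw [show Nat.find (pvValid_exists (cnt + 1)) = pvGap (cnt + 1) from rfl, h0] at hspec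
      simpa using hspec
    have hcond : PySem.Int.mod (cnt + 1) 3 ≠ 0 ∧
        PySem.Str.isIn "3" (PySem.Int.toStr (cnt + 1)) = false := by
      rw [pvValid] at hval
      simp only [Bool.and_eq_true, decide_eq_true_eq, Bool.not_eq_true'] at hval
      exact hval
    rw [solutionGo, if_pos hn, if_pos hcond]
    rw [nextGo_of_valid (cnt + 1) (by omega) hval]
  | succ g ih =>
    intro cnt hg hcnt n a hn
    by_cases hval : pvValid (cnt + 1) = true
    · have hcond : PySem.Int.mod (cnt + 1) 3 ≠ 0 ∧
          PySem.Str.isIn "3" (PySem.Int.toStr (cnt + 1)) = false := by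
        rw [pvValid] at hval
        simp only [Bool.and_eq_true, decide_eq_true_eq, Bool.not_eq_true'] at hval
        exact hval
      rw [solutionGo, if_pos hn, if_pos hcond]
      rw [nextGo_of_valid (cnt + 1) (by omega) hval]
    · have hvalf : pvValid (cnt + 1) = false := by simpa using hval
      have hcond : ¬ (PySem.Int.mod (cnt + 1) 3 ≠ 0 ∧
          PySem.Str.isIn "3" (PySem.Int.toStr (cnt + 1)) = false) := by
        intro ⟨h1, h2⟩
        rw [pvValid] at hvalf
        simp only [Bool.and_eq_false_iff, decide_eq_false_iff_not] at hvalf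
        rcases hvalf with h | h
        · exact h1 (by simpa using h)
        · rw [h2] at h; cases h
      have hgap : pvGap (cnt + 1 + 1) ≤ g := by
        have := pvGap_lt (cnt + 1) hvalf
        omega
      have hokf : ok (cnt + 1) = false := by
        rw [pv_ok_eq_valid (cnt + 1) (by omega)]; exact hvalf
      rw [solutionGo, if_pos hn, if_neg hcond]
      rw [ih (cnt + 1) hgap (by omega) n a hn,
        nextGo_of_invalid (cnt + 1) hokf]

lemma solutionGo_nonpos (n cnt a : Int) (h : ¬ 0 < n) : solutionGo n cnt a = a := by
  rw [solutionGo]; simp [h]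

-- A's loop, iterated: n rounds of "advance to next valid"
lemma solutionGo_iterate : ∀ (k : Nat) (cnt a : Int), 0 ≤ cnt →
    solutionGo ((k : Int) + 1) cnt a = (fun c => nextGo (c + 1))^[k + 1] cnt := by
  intro k
  induction k with
  | zero =>
    intro cnt a hcnt
    rw [solutionGo_step (pvGap (cnt + 1)) cnt le_rfl hcnt _ a (by omega)]
    simp [solutionGo_nonpos]
  | succ k ih =>
    intro cnt a hcnt
    have h1 : ((k : Int) + 1 + 1) - 1 = (k : Int) + 1 := by ring
    rw [show ((k + 1 : Nat) : Int) + 1 = (k : Int) + 1 + 1 by push_cast; ring,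
      solutionGo_step (pvGap (cnt + 1)) cnt le_rfl hcnt _ a (by positivity), h1]
    have hge : 0 ≤ nextGo (cnt + 1) := le_trans (by omega) (nextGo_ge (cnt + 1))
    rw [ih (nextGo (cnt + 1)) (nextGo (cnt + 1)) hge]
    rw [Function.iterate_succ_apply (fun c => nextGo (c + 1)) (k + 1) cnt]

-- ---- the base-9 enumeration of no-digit-3 numbers ----
def skip3 (d : Nat) : Nat := if d < 3 then d else d + 1

def map9 (q : Nat) : Nat :=
  if q = 0 then 0 else map9 (q / 9) * 10 + skip3 (q % 9)
  decreasing_by exact Nat.div_lt_self (by omega) (by omega)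

lemma okDigits_zero : okDigits 0 = true := by rw [okDigits]; norm_num

lemma okDigits_step (p d : Nat) (hd : d < 10) :
    okDigits ((p * 10 + d : Nat) : Int) = true ↔ (d ≠ 3 ∧ okDigits ((p : Nat) : Int) = true) := by
  by_cases hz : p * 10 + d = 0
  · have hp : p = 0 := by omega
    have hdd : d = 0 := by omega
    subst hp; subst hdd
    norm_num [okDigits_zero]
  · have hpos : (0 : Int) < ((p * 10 + d : Nat) : Int) := by exact_mod_cast Nat.pos_of_ne_zero hz
    have hmod : PySem.Int.mod ((p * 10 + d : Nat) : Int) 10 = (((p * 10 + d) % 10 : Nat) : Int) :=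
      PySem.Int.mod_natCast (p * 10 + d) 10
    have hmod' : PySem.Int.mod ((p * 10 + d : Nat) : Int) 10 = ((d : Nat) : Int) := by
      rw [hmod]; congr 1; omega
    have hdiv : PySem.Int.floordiv ((p * 10 + d : Nat) : Int) 10 = (((p * 10 + d) / 10 : Nat) : Int) :=
      PySem.Int.floordiv_natCast (p * 10 + d) 10
    have hdiv' : PySem.Int.floordiv ((p * 10 + d : Nat) : Int) 10 = ((p : Nat) : Int) := by
      rw [hdiv]; congr 1; omega
    rw [okDigits, if_pos hpos, hmod', hdiv']
    by_cases h3 : d = 3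
    · subst h3; norm_num
    · rw [if_neg (by exact_mod_cast h3 : ¬ ((d : Nat) : Int) = 3)]
      simp [h3]

lemma map9_zero : map9 0 = 0 := by rw [map9]; simp

lemma map9_mul_add (j s : Nat) (hs : s < 9) : map9 (j * 9 + s) = map9 j * 10 + skip3 s := by
  by_cases h : j * 9 + s = 0
  · have hj : j = 0 := by omega
    have hs0 : s = 0 := by omega
    subst hj; subst hs0
    norm_num [map9_zero, skip3]
  · rw [map9, if_neg h]
    have hdiv : (j * 9 + s) / 9 = j := by omega
    have hmod : (j * 9 + s) % 9 = s := by omega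
    rw [hdiv, hmod]

lemma skip3_lt (s : Nat) (hs : s < 9) : skip3 s < 10 := by
  simp only [skip3]; split <;> omega

lemma skip3_ne_three (s : Nat) : skip3 s ≠ 3 := by
  simp only [skip3]; split <;> omega

lemma map9_noThree (q : Nat) : okDigits ((map9 q : Nat) : Int) = true := by
  induction q using Nat.strong_induction_on with
  | _ q ih =>
    by_cases h : q = 0
    · subst h; rw [map9_zero]; exact okDigits_zero
    · have hq : q = (q / 9) * 9 + q % 9 := by omega
      rw [hq, map9_mul_add _ _ (by omega)]
      rw [okDigits_step _ _ (skip3_lt _ (by omega))]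
      exact ⟨skip3_ne_three _, ih (q / 9) (by omega)⟩

lemma map9_succ_lt (q : Nat) : map9 q < map9 (q + 1) := by
  induction q using Nat.strong_induction_on with
  | _ q ih =>
    by_cases h8 : q % 9 < 8
    · have h1 : q = (q / 9) * 9 + q % 9 := by omega
      have h2 : q + 1 = (q / 9) * 9 + (q % 9 + 1) := by omega
      have e1 := map9_mul_add (q / 9) (q % 9) (by omega)
      rw [← h1] at e1
      have e2 := map9_mul_add (q / 9) (q % 9 + 1) (by omega)
      rw [← h2] at e2
      rw [e1, e2]
      have : skip3 (q % 9) < skip3 (q % 9 + 1) := by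
        simp only [skip3]; split <;> split <;> omega
      omega
    · have h1 : q = (q / 9) * 9 + 8 := by omega
      have h2 : q + 1 = (q / 9 + 1) * 9 + 0 := by omega
      have hlt : q / 9 < q := by omega
      have ihj := ih (q / 9) hlt
      have e1 := map9_mul_add (q / 9) 8 (by omega)
      rw [← h1] at e1
      have e2 := map9_mul_add (q / 9 + 1) 0 (by omega)
      rw [← h2] at e2
      rw [e1, e2]
      simp only [skip3]
      norm_num
      omega

lemma map9_mono (a b : Nat) (h : a < b) : map9 a < map9 b := by
  induction b with
  | zero => omega
  | succ b ih =>
    rcases Nat.lt_succ_iff_lt_or_eq.mp h with h' | h'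
    · exact lt_trans (ih h') (map9_succ_lt b)
    · subst h'; exact map9_succ_lt a

lemma map9_le (a b : Nat) (h : a ≤ b) : map9 a ≤ map9 b := by
  rcases Nat.eq_or_lt_of_le h with h' | h'
  · rw [h']
  · exact le_of_lt (map9_mono a b h')

lemma map9_surj (x : Nat) (hx : okDigits ((x : Nat) : Int) = true) : ∃ q, map9 q = x := by
  induction x using Nat.strong_induction_on with
  | _ x ih =>
    by_cases h0 : x = 0
    · exact ⟨0, by rw [h0, map9_zero]⟩
    · have hdec : x = (x / 10) * 10 + x % 10 := by omega
      rw [hdec] at hx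
      rw [okDigits_step _ _ (by omega)] at hx
      obtain ⟨hne3, hp⟩ := hx
      obtain ⟨j, hj⟩ := ih (x / 10) (by omega) hp
      set d := x % 10 with hd
      have hd10 : d < 10 := by omega
      set s : Nat := if d < 3 then d else d - 1 with hs
      have hs9 : s < 9 := by simp only [hs]; split <;> omega
      have hsk : skip3 s = d := by
        simp only [hs, skip3]; split <;> (try split) <;> omega
      refine ⟨j * 9 + s, ?_⟩
      rw [map9_mul_add _ _ hs9, hj, hsk]
      omega

lemma map9_consec (q x : Nat) (h1 : map9 q < x) (h2 : x < map9 (q + 1)) :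
    okDigits ((x : Nat) : Int) = false := by
  rcases Bool.eq_false_or_eq_true (okDigits ((x : Nat) : Int)) with ht | hf
  · exfalso
    obtain ⟨j, hj⟩ := map9_surj x ht
    subst hj
    have hq : q < j := by
      by_contra hle
      push Not at hle
      have := map9_le j q hle
      omega
    have hj1 : j < q + 1 := by
      by_contra hle
      push Not at hle
      have := map9_le (q + 1) j hle
      omega
    omega
  · exact hf

-- ---- block structure: valid last digits over a fixed no-3 prefix ----
def allowN (p : Nat) : List Nat :=
  [0, 1, 2, 4, 5, 6, 7, 8, 9].filter (fun d => decide ((p + d) % 3 ≠ 0))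

lemma allowN_eq (p : Nat) : allowN p =
    if p % 3 = 0 then [1, 2, 4, 5, 7, 8]
    else if p % 3 = 1 then [0, 1, 4, 6, 7, 9]
    else [0, 2, 5, 6, 8, 9] := by
  have h3 : p % 3 = 0 ∨ p % 3 = 1 ∨ p % 3 = 2 := by omega
  have key : ∀ d : Nat, ((p + d) % 3 ≠ 0) ↔ ((p % 3 + d) % 3 ≠ 0) := by
    intro d; omega
  rcases h3 with h | h | h <;>
    simp [allowN, List.filter, h, key]

def validN (x : Nat) : Prop := x % 3 ≠ 0 ∧ okDigits ((x : Nat) : Int) = true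

lemma validN_block (p d : Nat) (hd : d < 10) :
    validN (p * 10 + d) ↔ ((p + d) % 3 ≠ 0 ∧ d ≠ 3 ∧ okDigits ((p : Nat) : Int) = true) := by
  unfold validN
  rw [okDigits_step _ _ hd]
  constructor
  · rintro ⟨h1, h2, h3⟩
    exact ⟨by omega, h2, h3⟩
  · rintro ⟨h1, h2, h3⟩
    exact ⟨by omega, h2, h3⟩

-- the m-th valid number (m ≥ 1), by block arithmetic
def FNat (m : Nat) : Nat :=
  map9 ((m - 1) / 6) * 10 + (allowN (map9 ((m - 1) / 6))).getD ((m - 1) % 6) 0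

lemma allowN_len (P : Nat) : (allowN P).length = 6 := by
  rw [allowN_eq]; split_ifs <;> rfl

lemma allowN_mem_facts (P d : Nat) (hd : d ∈ allowN P) : d < 10 ∧ d ≠ 3 ∧ (P + d) % 3 ≠ 0 := by
  unfold allowN at hd
  rw [List.mem_filter] at hd
  obtain ⟨hmem, hcond⟩ := hd
  simp only [decide_eq_true_eq] at hcond
  simp only [List.mem_cons, List.not_mem_nil, or_false] at hmem
  rcases hmem with h | h | h | h | h | h | h | h | h <;> subst h <;> exact ⟨by omega, by omega, hcond⟩

-- (i)+(ii)+(iii): FNat enumerates consecutive valid numbers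
lemma FNat_valid (m : Nat) (hm : 1 ≤ m) : validN (FNat m) := by
  obtain ⟨e, rfl⟩ : ∃ e, m = e + 1 := ⟨m - 1, by omega⟩
  show validN (map9 (e / 6) * 10 + (allowN (map9 (e / 6))).getD (e % 6) 0)
  have hlen : e % 6 < (allowN (map9 (e / 6))).length := by rw [allowN_len]; omega
  have hmem : (allowN (map9 (e / 6))).getD (e % 6) 0 ∈ allowN (map9 (e / 6)) := by
    rw [List.getD_eq_getElem _ 0 hlen]
    exact List.getElem_mem hlen
  obtain ⟨h10, h3, hm3⟩ := allowN_mem_facts _ _ hmem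
  rw [validN_block _ _ h10]
  exact ⟨hm3, h3, map9_noThree _⟩

lemma FNat_lt (m : Nat) (hm : 1 ≤ m) : FNat m < FNat (m + 1) := by
  obtain ⟨e, rfl⟩ : ∃ e, m = e + 1 := ⟨m - 1, by omega⟩
  show map9 (e / 6) * 10 + (allowN (map9 (e / 6))).getD (e % 6) 0 <
    map9 ((e + 1) / 6) * 10 + (allowN (map9 ((e + 1) / 6))).getD ((e + 1) % 6) 0
  by_cases h5 : e % 6 < 5
  · have hq2 : (e + 1) / 6 = e / 6 := by omega
    have hr2 : (e + 1) % 6 = e % 6 + 1 := by omega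
    rw [hq2, hr2]
    have h3 : map9 (e / 6) % 3 = 0 ∨ map9 (e / 6) % 3 = 1 ∨ map9 (e / 6) % 3 = 2 := by omega
    obtain ⟨rr, hrr⟩ : ∃ rr, e % 6 = rr := ⟨_, rfl⟩
    rw [hrr] at h5 ⊢
    rcases h3 with h | h | h <;> rw [allowN_eq] <;> simp only [h, if_true, if_false] <;>
      norm_num <;> interval_cases rr <;> simp
  · have hr5 : e % 6 = 5 := by omega
    have hq2 : (e + 1) / 6 = e / 6 + 1 := by omega
    have hr2 : (e + 1) % 6 = 0 := by omega
    have hpp : map9 (e / 6) < map9 (e / 6 + 1) := map9_succ_lt _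
    rw [hq2, hr2, hr5]
    have h3 : map9 (e / 6) % 3 = 0 ∨ map9 (e / 6) % 3 = 1 ∨ map9 (e / 6) % 3 = 2 := by omega
    have h9 : (allowN (map9 (e / 6))).getD 5 0 ≤ 9 := by
      rcases h3 with h | h | h <;> rw [allowN_eq] <;> simp [h]
    omega

lemma FNat_gap (m : Nat) (hm : 1 ≤ m) :
    ∀ x : Nat, FNat m < x → x < FNat (m + 1) → ¬ validN x := by
  obtain ⟨e, rfl⟩ : ∃ e, m = e + 1 := ⟨m - 1, by omega⟩
  intro x hx1 hx2 hval
  rw [show FNat (e + 1) = map9 (e / 6) * 10 + (allowN (map9 (e / 6))).getD (e % 6) 0 from rfl] at hx1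
  rw [show FNat (e + 1 + 1) = map9 ((e + 1) / 6) * 10 + (allowN (map9 ((e + 1) / 6))).getD ((e + 1) % 6) 0 from rfl] at hx2
  have h3 : map9 (e / 6) % 3 = 0 ∨ map9 (e / 6) % 3 = 1 ∨ map9 (e / 6) % 3 = 2 := by omega
  by_cases h5 : e % 6 < 5
  · have hq2 : (e + 1) / 6 = e / 6 := by omega
    have hr2 : (e + 1) % 6 = e % 6 + 1 := by omega
    rw [hq2, hr2] at hx2
    have hb9 : (allowN (map9 (e / 6))).getD (e % 6 + 1) 0 ≤ 9 := by
      have hlen : e % 6 + 1 < (allowN (map9 (e / 6))).length := by rw [allowN_len]; omega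
      have hmem : (allowN (map9 (e / 6))).getD (e % 6 + 1) 0 ∈ allowN (map9 (e / 6)) := by
        rw [List.getD_eq_getElem _ 0 hlen]
        exact List.getElem_mem hlen
      obtain ⟨h10, _, _⟩ := allowN_mem_facts _ _ hmem
      omega
    have hdec : x = map9 (e / 6) * 10 + (x - map9 (e / 6) * 10) := by omega
    rw [hdec] at hval
    obtain ⟨hm3, hne3, _⟩ := (validN_block _ _ (by omega)).mp hval
    obtain ⟨rr, hrr⟩ : ∃ rr, e % 6 = rr := ⟨_, rfl⟩
    rw [hrr] at h5 hx1 hx2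
    rcases h3 with h | h | h <;> rw [allowN_eq] at hx1 hx2 <;> simp only [h, if_true] at hx1 hx2 <;>
      norm_num at hx1 hx2 <;> interval_cases rr <;> simp at hx1 hx2 <;> omega
  · have hr5 : e % 6 = 5 := by omega
    have hq2 : (e + 1) / 6 = e / 6 + 1 := by omega
    have hr2 : (e + 1) % 6 = 0 := by omega
    rw [hq2, hr2] at hx2
    rw [hr5] at hx1
    have hpp : map9 (e / 6) < map9 (e / 6 + 1) := map9_succ_lt _
    by_cases hcase1 : x < map9 (e / 6) * 10 + 10
    · have hdec : x = map9 (e / 6) * 10 + (x - map9 (e / 6) * 10) := by omega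
      rw [hdec] at hval
      obtain ⟨hm3, hne3, _⟩ := (validN_block _ _ (by omega)).mp hval
      rcases h3 with h | h | h <;> rw [allowN_eq] at hx1 <;> simp only [h, if_true] at hx1 <;>
        norm_num at hx1 <;> omega
    · by_cases hcase2 : x < map9 (e / 6 + 1) * 10
      · have hc1 : map9 (e / 6) < x / 10 := by omega
        have hc2 : x / 10 < map9 (e / 6 + 1) := by omega
        have hdec : x = (x / 10) * 10 + x % 10 := by omega
        rw [hdec] at hval
        obtain ⟨_, _, hokp⟩ := (validN_block _ _ (by omega)).mp hval
        have hfalse := map9_consec (e / 6) (x / 10) hc1 hc2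
        rw [hokp] at hfalse
        cases hfalse
      · have h3' : map9 (e / 6 + 1) % 3 = 0 ∨ map9 (e / 6 + 1) % 3 = 1 ∨ map9 (e / 6 + 1) % 3 = 2 := by
          omega
        have hb0 : (allowN (map9 (e / 6 + 1))).getD 0 0 ≤ 1 := by
          rcases h3' with h | h | h <;> rw [allowN_eq] <;> simp [h]
        have hdec : x = map9 (e / 6 + 1) * 10 + (x - map9 (e / 6 + 1) * 10) := by omega
        rw [hdec] at hval
        obtain ⟨hm3, hne3, _⟩ := (validN_block _ _ (by omega)).mp hval
        have hbv : (allowN (map9 (e / 6 + 1))).getD 0 0 = 1 ∨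
            ((allowN (map9 (e / 6 + 1))).getD 0 0 = 0 ∧ map9 (e / 6 + 1) % 3 ≠ 0) ∨
            map9 (e / 6 + 1) % 3 = 0 := by
          rcases h3' with h | h | h <;> rw [allowN_eq] <;> simp [h]
        rcases hbv with hb | ⟨hb, _⟩ | hb
        · -- first allowed digit is 1, so the digit of x is 0 and map9 (e/6+1) % 3 = 0
          have hP0 : map9 (e / 6 + 1) % 3 = 0 := by
            rcases h3' with h | h | h
            · exact h
            · rw [allowN_eq] at hb; simp [h] at hb
            · rw [allowN_eq] at hb; simp [h] at hb
          omega
        · omega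
        · -- contradiction: if % 3 = 0 the first allowed digit is 1
          have : (allowN (map9 (e / 6 + 1))).getD 0 0 = 1 := by rw [allowN_eq]; simp [hb]
          omega

lemma FNat_one : FNat 1 = 1 := by
  show map9 0 * 10 + (allowN (map9 0)).getD 0 0 = 1
  rw [map9_zero, allowN_eq]
  norm_num

-- nextGo lands on v when v is the least valid candidate ≥ c
lemma ok_iff_validN (x : Nat) : ok ((x : Nat) : Int) = true ↔ validN x := by
  unfold ok validN
  have hmod : PySem.Int.mod ((x : Nat) : Int) 3 = ((x % 3 : Nat) : Int) := PySem.Int.mod_natCast x 3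
  rw [hmod]
  by_cases h : x % 3 = 0
  · rw [if_pos (by rw [h]; norm_num)]
    simp [h]
  · rw [if_neg (by exact_mod_cast h : ¬ ((x % 3 : Nat) : Int) = 0)]
    simp [h]

lemma nextGo_eq_of (g : Nat) : ∀ (c v : Int), (v - c).toNat ≤ g → c ≤ v → ok v = true →
    (∀ x : Int, c ≤ x → x < v → ok x = false) → nextGo c = v := by
  induction g with
  | zero =>
    intro c v hg hcv hv _
    have : c = v := by omega
    subst this
    rw [nextGo, hv]; simp
  | succ g ih =>
    intro c v hg hcv hv hbetween
    rcases eq_or_lt_of_le hcv with h | h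
    · subst h; rw [nextGo, hv]; simp
    · rw [nextGo_of_invalid c (hbetween c le_rfl h)]
      exact ih (c + 1) v (by omega) (by omega) hv (fun x hx1 hx2 => hbetween x (by omega) hx2)

lemma validN_one : validN 1 := by
  refine ⟨by omega, ?_⟩
  rw [show (1 : Nat) = 0 * 10 + 1 from rfl, okDigits_step 0 1 (by omega)]
  exact ⟨by omega, okDigits_zero⟩

-- the iterate of "advance" computes FNat
lemma iterate_eq_FNat (m : Nat) (hm : 1 ≤ m) :
    (fun c => nextGo (c + 1))^[m] (0 : Int) = ((FNat m : Nat) : Int) := by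
  induction m with
  | zero => omega
  | succ k ih =>
    rcases Nat.eq_zero_or_pos k with hk | hk
    · subst hk
      rw [Function.iterate_one]
      show nextGo (0 + 1) = ((FNat 1 : Nat) : Int)
      rw [FNat_one]
      refine nextGo_eq_of ((1 - (0 + 1) : Int).toNat) (0 + 1) 1 le_rfl (by norm_num) ?_ ?_
      · have hcast : ((1 : Nat) : Int) = (1 : Int) := by norm_num
        rw [← hcast, ok_iff_validN]
        exact validN_one
      · intro x hx1 hx2
        omega
    · have ihh := ih hk
      rw [Function.iterate_succ_apply', ihh]
      show nextGo (((FNat k : Nat) : Int) + 1) = ((FNat (k + 1) : Nat) : Int)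
      have hlt := FNat_lt k hk
      have hvalid := FNat_valid (k + 1) (by omega)
      refine nextGo_eq_of ((((FNat (k + 1) : Nat) : Int) - (((FNat k : Nat) : Int) + 1)).toNat)
        _ _ le_rfl (by omega) ?_ ?_
      · rw [ok_iff_validN]; exact hvalid
      · intro x hx1 hx2
        have hx0 : 0 ≤ x := by omega
        obtain ⟨xN, rfl⟩ : ∃ xN : Nat, x = ((xN : Nat) : Int) := ⟨x.toNat, by omega⟩
        rcases Bool.eq_false_or_eq_true (ok ((xN : Nat) : Int)) with ht | hf
        · exfalso
          exact FNat_gap k hk xN (by omega) (by omega) ((ok_iff_validN xN).mp ht)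
        · exact hf

-- ---- B computes FNat ----
lemma solutionAltGo_eq (qN : Nat) : ∀ (p mult : Int),
    solutionAltGo ((qN : Nat) : Int) p mult = p + mult * ((map9 qN : Nat) : Int) := by
  induction qN using Nat.strong_induction_on with
  | _ qN ih =>
    intro p mult
    by_cases h0 : qN = 0
    · subst h0
      rw [solutionAltGo, if_neg (by norm_num), map9_zero]
      norm_num
    · have hpos : (0 : Int) < ((qN : Nat) : Int) := by exact_mod_cast Nat.pos_of_ne_zero h0
      have hmod : PySem.Int.mod ((qN : Nat) : Int) 9 = ((qN % 9 : Nat) : Int) :=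
        PySem.Int.mod_natCast qN 9
      have hdiv : PySem.Int.floordiv ((qN : Nat) : Int) 9 = ((qN / 9 : Nat) : Int) :=
        PySem.Int.floordiv_natCast qN 9
      rw [solutionAltGo, if_pos hpos, hmod, hdiv, ih (qN / 9) (by omega)]
      have hsk : (if ((qN % 9 : Nat) : Int) < 3 then ((qN % 9 : Nat) : Int)
          else ((qN % 9 : Nat) : Int) + 1) = ((skip3 (qN % 9) : Nat) : Int) := by
        by_cases h : qN % 9 < 3
        · rw [if_pos (by exact_mod_cast h)]
          simp [skip3, h]
        · rw [if_neg (by exact_mod_cast h)]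
          push_cast [skip3, h]
          norm_num
      rw [hsk]
      rw [show map9 qN = map9 (qN / 9) * 10 + skip3 (qN % 9) from by rw [map9, if_neg h0]]
      push_cast
      ring

lemma pvCondCast (P dN : Nat) :
    decide (PySem.Int.mod (((P : Nat) : Int) + ((dN : Nat) : Int)) 3 ≠ 0) =
    decide ((P + dN) % 3 ≠ 0) := by
  have h1 : ((P : Nat) : Int) + ((dN : Nat) : Int) = ((P + dN : Nat) : Int) := by push_cast; ring
  have h2 : PySem.Int.mod ((P + dN : Nat) : Int) 3 = (((P + dN) % 3 : Nat) : Int) :=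
    PySem.Int.mod_natCast (P + dN) 3
  rw [h1, h2, decide_eq_decide]
  constructor
  · intro h hc; exact h (by exact_mod_cast hc)
  · intro h hc; exact h (by exact_mod_cast hc)

lemma pvFilterCast (P : Nat) : ∀ (l : List Nat),
    (l.map (fun d => ((d : Nat) : Int))).filter
      (fun d => decide (PySem.Int.mod (((P : Nat) : Int) + d) 3 ≠ 0)) =
    (l.filter (fun d => decide ((P + d) % 3 ≠ 0))).map (fun d => ((d : Nat) : Int)) := by
  intro l
  rw [List.filter_map]
  congr 1
  apply List.filter_congr
  intro d _
  exact pvCondCast P d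

lemma solution_alt_eq (n : Int) (hn : 1 ≤ n) : solution_alt n = ((FNat n.toNat : Nat) : Int) := by
  obtain ⟨N, rfl⟩ : ∃ N : Nat, n = ((N : Nat) : Int) := ⟨n.toNat, by omega⟩
  have hN : 1 ≤ N := by exact_mod_cast hn
  have h1 : ((N : Nat) : Int) - 1 = ((N - 1 : Nat) : Int) := by omega
  simp only [solution_alt]
  have hq : PySem.Int.floordiv ((N - 1 : Nat) : Int) 6 = (((N - 1) / 6 : Nat) : Int) :=
    PySem.Int.floordiv_natCast (N - 1) 6
  have hr : PySem.Int.mod ((N - 1 : Nat) : Int) 6 = (((N - 1) % 6 : Nat) : Int) :=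
    PySem.Int.mod_natCast (N - 1) 6
  rw [h1, hq, hr, solutionAltGo_eq]
  have hp : (0 : Int) + 1 * ((map9 ((N - 1) / 6) : Nat) : Int) = ((map9 ((N - 1) / 6) : Nat) : Int) := by
    ring
  rw [hp]
  have hlist : ([0, 1, 2, 4, 5, 6, 7, 8, 9] : List Int) =
      ([0, 1, 2, 4, 5, 6, 7, 8, 9] : List Nat).map (fun d => ((d : Nat) : Int)) := by decide
  rw [hlist, pvFilterCast]
  rw [PySem.List.pyGetD_natCast]
  rw [show (0 : Int) = ((fun d => ((d : Nat) : Int)) 0) from by norm_num, List.getD_map]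
  show ((map9 ((N - 1) / 6) : Nat) : Int) * 10 +
      ((allowN (map9 ((N - 1) / 6))).getD ((N - 1) % 6) 0 : Int)
    = ((FNat ((N : Nat) : Int).toNat : Nat) : Int)
  rw [show ((N : Nat) : Int).toNat = N from by omega]
  unfold FNat allowN
  push_cast
  ring

-- ---- A computes the iterate ----
lemma solution_eq_iterate (n : Int) (hn : 1 ≤ n) :
    solution n = (fun c => nextGo (c + 1))^[n.toNat] (0 : Int) := by
  rw [solution]
  obtain ⟨k, hk⟩ : ∃ k : Nat, n = (k : Int) + 1 := ⟨n.toNat - 1, by omega⟩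
  subst hk
  rw [solutionGo_iterate k 0 0 le_rfl]
  have h1 : ((k : Int) + 1).toNat = k + 1 := by omega
  rw [h1]

-- ===== VERDICT (by name: the statement is the Claim_ definition above) =====
theorem solution_spec : Claim_equal_solution := by
  unfold Claim_equal_solution
  intro n _ hpre
  unfold Spec_solution
  have hn : (1 : Int) ≤ n := hpre
  rw [solution_eq_iterate n hn, solution_alt_eq n hn,
    iterate_eq_FNat n.toNat (by omega)]
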